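-- pv_equiv track=rewrite | github.com/Long95percent/ShadowLink-interview | main.py | _split_stream_parts
-- ===== SOURCE A (Python) =====
-- def _split_stream_parts(chunk: str) -> list[str]:
--     s = chunk or ""
--     if not s:
--         return []
--     out: list[str] = []
--     buf = ""
--     for ch in s:
--         buf += ch
--         if ch == "\n" or len(buf) >= 12:
--             out.append(buf)
--             buf = ""
--     if buf:
--         out.append(buf)
--     return out
-- ===== SOURCE B (Python) =====
-- def _split_stream_parts(chunk: str) -> list[str]:
--     s = chunk or ""
--     # phase 1: split into segments, each ending with '\n' (plus a final remainder)
--     lines = []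
--     cur = ""
--     for ch in s:
--         cur += ch
--         if ch == "\n":
--             lines.append(cur)
--             cur = ""
--     if cur:
--         lines.append(cur)
--     # phase 2: slice every segment into fixed-width pieces of 12
--     out = []
--     for line in lines:
--         while line:
--             out.append(line[:12])
--             line = line[12:]
--     return out
-- ===== Notes on version B (the rewrite author's own statement) =====
-- stated objective: alternative
-- what changed: Replaced A's single pass with a combined flush condition (newline or 12-char buffer) by a two-phase decomposition: first split the string into newline-terminated segments, then cut each segment into fixed-width 12-char slices.
import Mathlib
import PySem

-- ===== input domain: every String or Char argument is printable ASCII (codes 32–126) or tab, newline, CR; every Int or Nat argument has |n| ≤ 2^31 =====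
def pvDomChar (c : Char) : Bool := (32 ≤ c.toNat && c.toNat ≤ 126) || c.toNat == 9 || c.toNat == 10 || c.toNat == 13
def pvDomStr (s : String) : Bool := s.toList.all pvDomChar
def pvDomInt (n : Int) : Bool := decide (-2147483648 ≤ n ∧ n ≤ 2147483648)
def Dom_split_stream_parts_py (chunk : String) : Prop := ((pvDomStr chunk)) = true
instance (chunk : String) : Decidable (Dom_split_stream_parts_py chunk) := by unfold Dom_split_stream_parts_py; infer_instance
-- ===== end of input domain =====

-- B replaces A's single pass (flush on newline or 12-char buffer) by two phases: split into
-- newline-terminated segments, then slice each segment into width-12 pieces ('alternative').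

-- ===== PORT A =====
-- one loop step: buf += ch; flush when ch == '\n' or len(buf) >= 12
def pvAStep (st : List String × List Char) (ch : Char) : List String × List Char :=
  let buf := st.2 ++ [ch]
  if ch = '\n' ∨ 12 ≤ buf.length then (st.1 ++ [String.ofList buf], []) else (st.1, buf)

def split_stream_parts_py (chunk : String) : List String :=
  -- s = chunk or ""  (identity on strings: falsy string is "")
  let s := chunk
  if s.toList = [] then []
  else
    let r := s.toList.foldl pvAStep ([], [])
    if r.2 ≠ [] then r.1 ++ [String.ofList r.2] else r.1

-- ===== PORT B =====
-- phase-1 step: cur += ch; on '\n' append cur to lines (strings carried as List Char)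
def pvBLineStep (st : List (List Char) × List Char) (ch : Char) : List (List Char) × List Char :=
  let cur := st.2 ++ [ch]
  if ch = '\n' then (st.1 ++ [cur], []) else (st.1, cur)

-- phase-2 while loop: out.append(line[:12]); line = line[12:]
def pvChunks (line : List Char) : List String :=
  if line = [] then [] else String.ofList (line.take 12) :: pvChunks (line.drop 12)
termination_by line.length
decreasing_by rename_i h; cases line with | nil => exact absurd rfl h | cons a l => simp [List.length_drop]

def split_stream_parts_py_alt (chunk : String) : List String :=
  let s := chunk
  let r := s.toList.foldl pvBLineStep ([], [])
  let lines := if r.2 ≠ [] then r.1 ++ [r.2] else r.1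
  lines.flatMap pvChunks

-- ===== PRECONDITION & SPEC =====
def Spec_split_stream_parts_py (chunk : String) (out : List String) : Prop := out = split_stream_parts_py_alt chunk
instance (chunk : String) (out : List String) : Decidable (Spec_split_stream_parts_py chunk out) := by unfold Spec_split_stream_parts_py; infer_instance

-- ===== CLAIM (what is proved, stated in full; the proofs are below) =====
def Claim_equal_split_stream_parts_py : Prop := ∀ (chunk : String), Dom_split_stream_parts_py chunk → Spec_split_stream_parts_py chunk (split_stream_parts_py chunk)

-- ===== LEMMAS AND PROOFS =====

-- the full width-12 chunks of a list, and the (short) remainder after them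
def pvFull (l : List Char) : List String :=
  if l.length < 12 then [] else String.ofList (l.take 12) :: pvFull (l.drop 12)
termination_by l.length
decreasing_by simp [List.length_drop]; omega

def pvRem (l : List Char) : List Char :=
  if l.length < 12 then l else pvRem (l.drop 12)
termination_by l.length
decreasing_by simp [List.length_drop]; omega

-- A's loop never fires on short newline-free input
theorem pvA_no_fire (xs : List Char) : ∀ (out : List String) (buf : List Char),
    (∀ c ∈ xs, c ≠ '\n') → buf.length + xs.length < 12 →
    List.foldl pvAStep (out, buf) xs = (out, buf ++ xs) := by
  induction xs with
  | nil => intro out buf _ _; simp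
  | cons c cs ih =>
      intro out buf hnl hlen
      have hc : c ≠ '\n' := hnl c (List.mem_cons_self ..)
      simp only [List.foldl_cons, pvAStep]
      rw [if_neg (by simp at hlen ⊢; exact ⟨hc, by omega⟩)]
      rw [ih out (buf ++ [c]) (fun d hd => hnl d (List.mem_cons_of_mem _ hd)) (by simp at hlen ⊢; omega)]
      simp

-- A's loop fires exactly at the end of a 12-char newline-free stretch
theorem pvA_fire_end (xs : List Char) : ∀ (out : List String) (buf : List Char),
    (∀ c ∈ xs, c ≠ '\n') → xs ≠ [] → buf.length + xs.length = 12 →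
    List.foldl pvAStep (out, buf) xs = (out ++ [String.ofList (buf ++ xs)], []) := by
  induction xs with
  | nil => intro out buf _ h _; exact absurd rfl h
  | cons c cs ih =>
      intro out buf hnl _ hlen
      have hc : c ≠ '\n' := hnl c (List.mem_cons_self ..)
      simp only [List.foldl_cons, pvAStep]
      cases cs with
      | nil =>
          rw [if_pos (by simp at hlen ⊢; omega)]
          simp
      | cons d ds =>
          rw [if_neg (by simp at hlen ⊢; exact ⟨hc, by omega⟩)]
          rw [ih out (buf ++ [c]) (fun e he => hnl e (List.mem_cons_of_mem _ he)) (by simp) (by simp at hlen ⊢; omega)]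
          simp

-- A's loop on a newline-free block from an empty buffer
theorem pvA_block (body : List Char) (out : List String)
    (h : ∀ c ∈ body, c ≠ '\n') :
    List.foldl pvAStep (out, []) body = (out ++ pvFull body, pvRem body) := by
  fun_induction pvFull body generalizing out with
  | case1 l hl =>
      rw [pvRem, if_pos hl, pvA_no_fire l out [] (by simpa using h) (by simpa using hl)]
      simp
  | case2 l hl ih =>
      have hsplit : l = l.take 12 ++ l.drop 12 := (List.take_append_drop 12 l).symm
      rw [pvRem, if_neg hl]
      conv_lhs => rw [hsplit]
      rw [List.foldl_append,
          pvA_fire_end (l.take 12) out [] (fun c hc => h c (List.mem_of_mem_take hc))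
            (by intro he; have hlen := congrArg List.length he; simp [List.length_take] at hlen; rw [hlen] at hl; simp at hl)
            (by simp [List.length_take]; omega),
          ih _ (fun c hc => h c (List.mem_of_mem_drop hc))]
      simp

-- B's line loop on a newline-free block
theorem pvB_block (body : List Char) (out : List (List Char)) (cur : List Char)
    (h : ∀ c ∈ body, c ≠ '\n') :
    List.foldl pvBLineStep (out, cur) body = (out, cur ++ body) := by
  induction body generalizing out cur with
  | nil => simp
  | cons c cs ih =>
      have hc : c ≠ '\n' := h c (List.mem_cons_self ..)
      simp only [List.foldl_cons, pvBLineStep]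
      rw [if_neg hc, ih _ _ (fun d hd => h d (List.mem_cons_of_mem _ hd))]
      simp

-- accumulator generalization for A's fold
theorem pvA_shift (cs : List Char) : ∀ (out : List String) (buf : List Char),
    List.foldl pvAStep (out, buf) cs =
      (out ++ (List.foldl pvAStep ([], buf) cs).1, (List.foldl pvAStep ([], buf) cs).2) := by
  induction cs with
  | nil => simp
  | cons c cs ih =>
      intro out buf
      simp only [List.foldl_cons, pvAStep]
      by_cases hc : c = '\n' ∨ 12 ≤ (buf ++ [c]).length
      · rw [if_pos hc, if_pos hc, ih (out ++ _) [], ih ([] ++ [String.ofList (buf ++ [c])]) []]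
        simp
      · rw [if_neg hc, if_neg hc, ih out (buf ++ [c]), ih [] (buf ++ [c])]

-- accumulator generalization for B's line fold
theorem pvB_shift (cs : List Char) : ∀ (out : List (List Char)) (cur : List Char),
    List.foldl pvBLineStep (out, cur) cs =
      (out ++ (List.foldl pvBLineStep ([], cur) cs).1, (List.foldl pvBLineStep ([], cur) cs).2) := by
  induction cs with
  | nil => simp
  | cons c cs ih =>
      intro out cur
      simp only [List.foldl_cons, pvBLineStep]
      by_cases hc : c = '\n'
      · rw [if_pos hc, if_pos hc, ih (out ++ _) [], ih ([] ++ [cur ++ [c]]) []]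
        simp
      · rw [if_neg hc, if_neg hc, ih out (cur ++ [c]), ih [] (cur ++ [c])]

-- chunks of a newline-free remainder block
theorem pvChunks_eq (body : List Char) :
    pvChunks body = pvFull body ++ (if pvRem body = [] then [] else [String.ofList (pvRem body)]) := by
  fun_induction pvFull body with
  | case1 l hl =>
      rw [pvRem, if_pos hl, pvChunks]
      by_cases he : l = []
      · simp [he]
      · rw [if_neg he]
        have h1 : l.take 12 = l := List.take_of_length_le (by omega)
        have h2 : l.drop 12 = [] := List.drop_eq_nil_of_le (by omega)
        rw [h1, h2, pvChunks, if_pos rfl, if_neg he]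
        simp
  | case2 l hl ih =>
      rw [pvRem, if_neg hl, pvChunks,
          if_neg (by intro he; rw [he] at hl; simp at hl), ih]
      simp

-- chunks of a newline-terminated segment
theorem pvChunks_newline (body : List Char) :
    pvChunks (body ++ ['\n']) = pvFull body ++ [String.ofList (pvRem body ++ ['\n'])] := by
  fun_induction pvFull body with
  | case1 l hl =>
      rw [pvRem, if_pos hl, pvChunks, if_neg (by simp)]
      have h1 : (l ++ ['\n']).take 12 = l ++ ['\n'] := List.take_of_length_le (by simp; omega)
      have h2 : (l ++ ['\n']).drop 12 = [] := List.drop_eq_nil_of_le (by simp; omega)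
      rw [h1, h2, pvChunks, if_pos rfl]
      simp
  | case2 l hl ih =>
      rw [pvRem, if_neg hl, pvChunks, if_neg (by simp)]
      have h1 : (l ++ ['\n']).take 12 = l.take 12 := List.take_append_of_le_length (by omega)
      have h2 : (l ++ ['\n']).drop 12 = l.drop 12 ++ ['\n'] := List.drop_append_of_le_length (by omega)
      rw [h1, h2, ih]
      simp

-- head of dropWhile fails the predicate
theorem pvDropWhile_head {p : Char → Bool} {cs rest : List Char} {d : Char}
    (hd : cs.dropWhile p = d :: rest) : p d = false := by
  induction cs with
  | nil => simp at hd
  | cons c cs ih =>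
      rw [List.dropWhile_cons] at hd
      by_cases hc : p c
      · exact ih (by simpa [hc] using hd)
      · rw [if_neg (by simp [hc])] at hd
        cases hd
        simpa using hc

-- the main invariant: A's finished output equals B's flatMap over its lines
theorem pvMain (cs : List Char) :
    (let a := List.foldl pvAStep ([], []) cs
     if a.2 ≠ [] then a.1 ++ [String.ofList a.2] else a.1) =
    (let b := List.foldl pvBLineStep ([], []) cs
     (if b.2 ≠ [] then b.1 ++ [b.2] else b.1).flatMap pvChunks) := by
  generalize hlen : cs.length = n
  induction n using Nat.strong_induction_on generalizing cs with
  | _ n ih =>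
  by_cases hnl : '\n' ∈ cs
  · -- split at the first newline
    have hsplit := (List.takeWhile_append_dropWhile (p := (· != '\n')) (l := cs)).symm
    have hbody : ∀ c ∈ cs.takeWhile (· != '\n'), c ≠ '\n' := by
      intro c hc
      have := List.mem_takeWhile_imp hc
      simpa using this
    cases hd : cs.dropWhile (· != '\n') with
    | nil =>
        exfalso
        rw [hd, List.append_nil] at hsplit
        rw [hsplit] at hnl
        have := List.mem_takeWhile_imp hnl
        simp at this
    | cons d rest =>
        have hdnl : d = '\n' := by simpa using pvDropWhile_head hd
        rw [hd, hdnl] at hsplit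
        set body := cs.takeWhile (· != '\n') with hbodydef
        -- A side
        have hA : List.foldl pvAStep ([], []) cs =
            (pvFull body ++ [String.ofList (pvRem body ++ ['\n'])] ++ (List.foldl pvAStep ([], []) rest).1,
             (List.foldl pvAStep ([], []) rest).2) := by
          rw [hsplit, List.foldl_append, pvA_block body [] hbody, List.foldl_cons]
          show List.foldl pvAStep (pvAStep (pvFull body, pvRem body) '\n') rest = _
          rw [show pvAStep (pvFull body, pvRem body) '\n'
                = (pvFull body ++ [String.ofList (pvRem body ++ ['\n'])], []) from by
              simp [pvAStep]]
          rw [pvA_shift rest]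
        -- B side
        have hB : List.foldl pvBLineStep ([], []) cs =
            ([body ++ ['\n']] ++ (List.foldl pvBLineStep ([], []) rest).1,
             (List.foldl pvBLineStep ([], []) rest).2) := by
          rw [hsplit, List.foldl_append, pvB_block body [] [] hbody, List.foldl_cons]
          show List.foldl pvBLineStep (pvBLineStep ([], [] ++ body) '\n') rest = _
          rw [show pvBLineStep ([], [] ++ body) '\n' = ([body ++ ['\n']], []) from by
              simp [pvBLineStep]]
          rw [pvB_shift rest]
        have hrest : rest.length < n := by
          rw [← hlen, hsplit]
          simp
          omega
        have hih := ih rest.length hrest rest rfl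
        rw [hA, hB]
        by_cases ha : (List.foldl pvAStep ([], []) rest).2 = [] <;>
          by_cases hb : (List.foldl pvBLineStep ([], []) rest).2 = [] <;>
            simp [ha, hb, pvChunks_newline, List.flatMap_append] at hih ⊢ <;>
              simp [hih]
  · -- no newline at all: one (possibly empty) line
    have hbody : ∀ c ∈ cs, c ≠ '\n' := fun c hc he => hnl (he ▸ hc)
    rw [pvA_block cs [] hbody, pvB_block cs [] [] hbody]
    by_cases he : cs = []
    · simp [he, pvRem, pvFull]
    · have hrem := pvChunks_eq cs
      by_cases hr : pvRem cs = []
      · simp [hr, he, hrem]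
      · simp [hr, he, hrem]

-- ===== VERDICT (by name: the statement is the Claim_ definition above) =====
theorem split_stream_parts_py_spec : Claim_equal_split_stream_parts_py := by
  intro chunk _
  unfold Spec_split_stream_parts_py split_stream_parts_py split_stream_parts_py_alt
  by_cases h : chunk.toList = []
  · simp [h]
  · simpa [h] using pvMain chunk.toList
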